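-- pv_equiv track=rewrite | github.com/vatsalyab123/face-recognition-system | face_recognization_system/attendance.py | get_current_period
-- ===== SOURCE A (Python) =====
-- def get_current_period(time):
--     periods = {
--         "1st Period": ("00:00", "00:50"),
--         "2nd Period": ("01:00", "01:50"),
--         "3rd Period": ("02:00", "02:50"),
--         "4th Period": ("03:00", "03:50"),
--         "5th Period": ("04:00", "04:50"),
--         "6th Period": ("05:00", "05:50"),
--         "7th Period": ("06:00", "06:50"),
--         "8th Period": ("07:00", "07:50"),
--         "9th Period": ("08:00", "08:50"),
--         "10th Period": ("09:00", "09:50"),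
--         "11th Period": ("10:00", "10:50"),
--         "12th Period": ("11:00", "11:50"),
--         "13th Period": ("12:00", "12:50"),
--         "14th Period": ("13:00", "13:50"),
--         "15th Period": ("14:00", "14:50"),
--         "16th Period": ("15:00", "15:50"),
--         "17th Period": ("16:00", "16:50"),
--         "18th Period": ("17:00", "17:50"),
--         "19th Period": ("18:00", "18:50"),
--         "20th Period": ("19:00", "19:50"),
--         "21st Period": ("20:00", "20:50"),
--         "22nd Period": ("21:00", "21:50"),
--         "23rd Period": ("22:00", "22:50"),
--         "24th Period": ("23:00", "23:50"),
--     }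
--
--     for period, (start, end) in periods.items():
--         if start <= time <= end:
--             return period
--     return "Unknown"
-- ===== SOURCE B (Python) =====
-- ORDINALS = ["1st", "2nd", "3rd"] + [f"{i}th" for i in range(4, 21)] + ["21st", "22nd", "23rd", "24th"]
-- NAMES = {f"{h:02d}": f"{ORDINALS[h]} Period" for h in range(24)}
--
-- def get_current_period(time):
--     hour = time[:2]
--     period = NAMES.get(hour)
--     if period is not None and hour + ":00" <= time <= hour + ":50":
--         return period
--     return "Unknown"
-- ===== Notes on version B (the rewrite author's own statement) =====
-- stated objective: simpler
-- what changed: Replaced the 24-iteration linear scan over period ranges by a single dict lookup keyed on the two-character hour prefix time[:2] plus one range comparison, with the period names generated from the hour ordinal at module load.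
import Mathlib
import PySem

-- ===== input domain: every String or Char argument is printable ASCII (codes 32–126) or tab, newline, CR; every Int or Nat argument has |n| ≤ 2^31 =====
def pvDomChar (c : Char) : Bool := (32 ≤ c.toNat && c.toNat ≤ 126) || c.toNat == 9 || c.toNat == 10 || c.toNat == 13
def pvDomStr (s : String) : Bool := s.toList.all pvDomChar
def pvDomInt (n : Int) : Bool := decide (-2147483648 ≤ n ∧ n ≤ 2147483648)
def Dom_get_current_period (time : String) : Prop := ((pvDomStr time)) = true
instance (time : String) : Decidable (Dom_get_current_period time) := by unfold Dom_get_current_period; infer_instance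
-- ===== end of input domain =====

-- B replaces A's 24-entry linear scan (one string-range test per period) by a single keyed lookup
-- on the two-char hour prefix plus one range test; return values are proved identical on all inputs.

-- Python's `<=` on str, exactly: code-point lexicographic comparison on the character lists
-- (shared by both ports; both Pythons compare strings with the same built-in `<=`).
def pyLe : List Char → List Char → Bool
  | [], _ => true
  | _ :: _, [] => false
  | a :: as, b :: bs => if a < b then true else if b < a then false else pyLe as bs

-- ===== PORT A =====
-- A's dict literal, as an association list in insertion order (period ↦ (start, end)).
def periodsA : List (String × String × String) :=
  [("1st Period", "00:00", "00:50"), ("2nd Period", "01:00", "01:50"),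
   ("3rd Period", "02:00", "02:50"), ("4th Period", "03:00", "03:50"),
   ("5th Period", "04:00", "04:50"), ("6th Period", "05:00", "05:50"),
   ("7th Period", "06:00", "06:50"), ("8th Period", "07:00", "07:50"),
   ("9th Period", "08:00", "08:50"), ("10th Period", "09:00", "09:50"),
   ("11th Period", "10:00", "10:50"), ("12th Period", "11:00", "11:50"),
   ("13th Period", "12:00", "12:50"), ("14th Period", "13:00", "13:50"),
   ("15th Period", "14:00", "14:50"), ("16th Period", "15:00", "15:50"),
   ("17th Period", "16:00", "16:50"), ("18th Period", "17:00", "17:50"),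
   ("19th Period", "18:00", "18:50"), ("20th Period", "19:00", "19:50"),
   ("21st Period", "20:00", "20:50"), ("22nd Period", "21:00", "21:50"),
   ("23rd Period", "22:00", "22:50"), ("24th Period", "23:00", "23:50")]

-- A's for-loop with early return: first entry whose range contains `time` wins.
def loopA : List (String × String × String) → List Char → String
  | [], _ => "Unknown"
  | (p, s, e) :: rest, t =>
      if pyLe s.toList t && pyLe t e.toList then p else loopA rest t

def get_current_period (time : String) : String := loopA periodsA time.toList

-- ===== PORT B =====
-- B's module-level NAMES dict (hour prefix ↦ period name), written out as its value.
def namesB : PySem.Dict String String := PySem.Dict.ofList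
  [("00", "1st Period"), ("01", "2nd Period"), ("02", "3rd Period"), ("03", "4th Period"),
   ("04", "5th Period"), ("05", "6th Period"), ("06", "7th Period"), ("07", "8th Period"),
   ("08", "9th Period"), ("09", "10th Period"), ("10", "11th Period"), ("11", "12th Period"),
   ("12", "13th Period"), ("13", "14th Period"), ("14", "15th Period"), ("15", "16th Period"),
   ("16", "17th Period"), ("17", "18th Period"), ("18", "19th Period"), ("19", "20th Period"),
   ("20", "21st Period"), ("21", "22nd Period"), ("22", "23rd Period"), ("23", "24th Period")]

-- hour = time[:2]; names.get(hour); hour + ":00" <= time <= hour + ":50".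
-- String concatenation is done on the character lists (kernel-transparent; exact for `+` on str).
def get_current_period_alt (time : String) : String :=
  let hour := PySem.Str.slice time none (some 2)
  match namesB.get? hour with
  | some period =>
      if pyLe (hour.toList ++ (":00").toList) time.toList
          && pyLe time.toList (hour.toList ++ (":50").toList) then period
      else "Unknown"
  | none => "Unknown"

-- ===== PRECONDITION & SPEC =====
def Spec_get_current_period (time : String) (out : String) : Prop := out = get_current_period_alt time
instance (time : String) (out : String) : Decidable (Spec_get_current_period time out) := by unfold Spec_get_current_period; infer_instance

-- ===== CLAIM (what is proved, stated in full; the proofs are below) =====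
def Claim_equal_get_current_period : Prop := ∀ (time : String), Dom_get_current_period time → Spec_get_current_period time (get_current_period time)

-- ===== LEMMAS AND PROOFS =====

-- Both bounds of one period share a two-char hour prefix; a string lying between them
-- must carry exactly that prefix, and then only the tail is compared.
theorem pyLe_pair (a b : Char) (u v t : List Char) :
    (pyLe (a :: b :: u) t && pyLe t (a :: b :: v)) = true ↔
      (t.take 2 = [a, b] ∧ (pyLe u (t.drop 2) && pyLe (t.drop 2) v) = true) := by
  match t with
  | [] => simp [pyLe]
  | [x] =>
    simp only [pyLe, List.take, List.drop]
    rcases lt_trichotomy a x with h | h | h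
    · simp [h, not_lt.mpr h.le]
    · subst h; simp
    · simp [h, not_lt.mpr h.le]
  | x :: y :: w =>
    simp only [pyLe, List.take, List.drop]
    rcases lt_trichotomy a x with h | h | h
    · simp only [h, if_true, not_lt.mpr h.le, if_false, Bool.true_and]
      constructor
      · intro hc; simp at hc
      · rintro ⟨⟨rfl, _⟩, _⟩; exact absurd h (lt_irrefl _)
    · subst h
      rcases lt_trichotomy b y with h2 | h2 | h2
      · simp only [lt_irrefl, if_false, h2, if_true, not_lt.mpr h2.le, Bool.true_and]
        constructor
        · intro hc; simp at hc
        · rintro ⟨⟨_, rfl, _⟩, _⟩; exact absurd h2 (lt_irrefl _)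
      · subst h2; simp
      · simp only [lt_irrefl, if_false, h2, if_true, not_lt.mpr h2.le, Bool.and_true]
        constructor
        · intro hc; simp at hc
        · rintro ⟨⟨_, rfl, _⟩, _⟩; exact absurd h2 (lt_irrefl _)
    · simp only [h, if_true, not_lt.mpr h.le, if_false, Bool.and_false, Bool.false_and]
      constructor
      · intro hc; simp at hc
      · rintro ⟨⟨rfl, _⟩, _⟩; exact absurd h (lt_irrefl _)

-- The tail-of-the-range test shared by every period entry.
def tailOK (t : List Char) : Bool :=
  pyLe [':', '0', '0'] (t.drop 2) && pyLe (t.drop 2) [':', '5', '0']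

-- A's scan over entries built from two-char hour keys equals a keyed lookup on time[:2]
-- followed by the single tail test.
theorem scan_eq_lookup (t : List Char) :
    ∀ L : List (String × String),
      (∀ p ∈ L, p.1.toList.length = 2) →
      loopA (L.map (fun p => (p.2, String.ofList (p.1.toList ++ [':', '0', '0']),
                                    String.ofList (p.1.toList ++ [':', '5', '0'])))) t =
        match (PySem.Dict.mk L).get? (String.ofList (t.take 2)) with
        | some period => if tailOK t then period else "Unknown"
        | none => "Unknown" := by
  intro L
  induction L with
  | nil =>
    intro _
    simp [loopA, PySem.Dict.get?]
  | cons hd rest ih =>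
    intro hlen
    obtain ⟨k, n⟩ := hd
    obtain ⟨a, b, hk⟩ : ∃ a b, k.toList = [a, b] := by
      have h2 := hlen (k, n) (by simp)
      match h : k.toList with
      | [a, b] => exact ⟨a, b, rfl⟩
      | [] | [_] | _ :: _ :: _ :: _ => simp [h] at h2
    have ihr := ih (fun p hp => hlen p (by simp [hp]))
    simp only [List.map_cons, loopA, String.toList_ofList, hk, PySem.Dict.get?_mk_cons,
               List.cons_append, List.nil_append]
    by_cases hpre : t.take 2 = [a, b]
    · have hbeq : (k == String.ofList (t.take 2)) = true := by
        simp [String.ext_iff, hk, hpre]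
      rw [hbeq]
      by_cases htail : tailOK t = true
      · have : (pyLe (a :: b :: [':', '0', '0']) t && pyLe t (a :: b :: [':', '5', '0'])) = true :=
          (pyLe_pair a b _ _ t).mpr ⟨hpre, htail⟩
        simp [this, htail]
      · have hcond : (pyLe (a :: b :: [':', '0', '0']) t && pyLe t (a :: b :: [':', '5', '0'])) = false := by
          rw [Bool.eq_false_iff]
          intro hc
          exact htail ((pyLe_pair a b _ _ t).mp hc).2
        rw [hcond]
        simp only [Bool.false_eq_true, if_false]
        rw [ihr]
        cases (PySem.Dict.mk rest).get? (String.ofList (t.take 2)) <;> simp [htail]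
    · have hcond : (pyLe (a :: b :: [':', '0', '0']) t && pyLe t (a :: b :: [':', '5', '0'])) = false := by
        rw [Bool.eq_false_iff]
        intro hc
        exact hpre ((pyLe_pair a b _ _ t).mp hc).1
      have hbeq : (k == String.ofList (t.take 2)) = false := by
        simp only [beq_eq_false_iff_ne, ne_eq, String.ext_iff, String.toList_ofList, hk]
        exact fun h => hpre h.symm
      rw [hcond, hbeq, ihr]
      simp

-- ===== VERDICT (by name: the statement is the Claim_ definition above) =====
theorem get_current_period_spec : Claim_equal_get_current_period := by
  intro time _
  unfold Spec_get_current_period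
  have hslice : (PySem.Str.slice time none (some 2)).toList = time.toList.take 2 := by
    simp [PySem.Str.slice, PySem.Chars.slice_eq_listSlice, PySem.List.slice_to]
  have hhour : PySem.Str.slice time none (some 2) = String.ofList (time.toList.take 2) := by
    rw [String.ext_iff, hslice]; simp
  have hA : periodsA =
      ([("00", "1st Period"), ("01", "2nd Period"), ("02", "3rd Period"), ("03", "4th Period"),
        ("04", "5th Period"), ("05", "6th Period"), ("06", "7th Period"), ("07", "8th Period"),
        ("08", "9th Period"), ("09", "10th Period"), ("10", "11th Period"), ("11", "12th Period"),
        ("12", "13th Period"), ("13", "14th Period"), ("14", "15th Period"), ("15", "16th Period"),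
        ("16", "17th Period"), ("17", "18th Period"), ("18", "19th Period"), ("19", "20th Period"),
        ("20", "21st Period"), ("21", "22nd Period"), ("22", "23rd Period"), ("23", "24th Period")]
        : List (String × String)).map
        (fun p => (p.2, String.ofList (p.1.toList ++ [':', '0', '0']),
                         String.ofList (p.1.toList ++ [':', '5', '0']))) := by decide
  have hdict : namesB = PySem.Dict.mk
      [("00", "1st Period"), ("01", "2nd Period"), ("02", "3rd Period"), ("03", "4th Period"),
       ("04", "5th Period"), ("05", "6th Period"), ("06", "7th Period"), ("07", "8th Period"),
       ("08", "9th Period"), ("09", "10th Period"), ("10", "11th Period"), ("11", "12th Period"),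
       ("12", "13th Period"), ("13", "14th Period"), ("14", "15th Period"), ("15", "16th Period"),
       ("16", "17th Period"), ("17", "18th Period"), ("18", "19th Period"), ("19", "20th Period"),
       ("20", "21st Period"), ("21", "22nd Period"), ("22", "23rd Period"), ("23", "24th Period")] := by
    decide
  rw [get_current_period, get_current_period_alt, hA, hdict, hhour,
      scan_eq_lookup time.toList _ (by decide)]
  simp only [String.toList_ofList, tailOK]
  cases hres : (PySem.Dict.mk
      [("00", "1st Period"), ("01", "2nd Period"), ("02", "3rd Period"), ("03", "4th Period"),
       ("04", "5th Period"), ("05", "6th Period"), ("06", "7th Period"), ("07", "8th Period"),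
       ("08", "9th Period"), ("09", "10th Period"), ("10", "11th Period"), ("11", "12th Period"),
       ("12", "13th Period"), ("13", "14th Period"), ("14", "15th Period"), ("15", "16th Period"),
       ("16", "17th Period"), ("17", "18th Period"), ("18", "19th Period"), ("19", "20th Period"),
       ("20", "21st Period"), ("21", "22nd Period"), ("22", "23rd Period"), ("23", "24th Period")]
      : PySem.Dict String String).get? (String.ofList (time.toList.take 2)) with
  | none => rfl
  | some period =>
    have hcont := PySem.Dict.contains_eq_isSome_get? (k := String.ofList (time.toList.take 2))
      (d := PySem.Dict.mk
      [("00", "1st Period"), ("01", "2nd Period"), ("02", "3rd Period"), ("03", "4th Period"),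
       ("04", "5th Period"), ("05", "6th Period"), ("06", "7th Period"), ("07", "8th Period"),
       ("08", "9th Period"), ("09", "10th Period"), ("10", "11th Period"), ("11", "12th Period"),
       ("12", "13th Period"), ("13", "14th Period"), ("14", "15th Period"), ("15", "16th Period"),
       ("16", "17th Period"), ("17", "18th Period"), ("18", "19th Period"), ("19", "20th Period"),
       ("20", "21st Period"), ("21", "22nd Period"), ("22", "23rd Period"), ("23", "24th Period")])
    rw [hres] at hcont
    have hmem : String.ofList (time.toList.take 2) ∈ (PySem.Dict.mk
      [("00", "1st Period"), ("01", "2nd Period"), ("02", "3rd Period"), ("03", "4th Period"),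
       ("04", "5th Period"), ("05", "6th Period"), ("06", "7th Period"), ("07", "8th Period"),
       ("08", "9th Period"), ("09", "10th Period"), ("10", "11th Period"), ("11", "12th Period"),
       ("12", "13th Period"), ("13", "14th Period"), ("14", "15th Period"), ("15", "16th Period"),
       ("16", "17th Period"), ("17", "18th Period"), ("18", "19th Period"), ("19", "20th Period"),
       ("20", "21st Period"), ("21", "22nd Period"), ("22", "23rd Period"), ("23", "24th Period")]
      : PySem.Dict String String).keys := by
      rw [← PySem.Dict.contains_iff_mem_keys, hcont]; rfl
    have hlen2 : (time.toList.take 2).length = 2 := by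
      have hall : ∀ k ∈ (PySem.Dict.mk
        [("00", "1st Period"), ("01", "2nd Period"), ("02", "3rd Period"), ("03", "4th Period"),
         ("04", "5th Period"), ("05", "6th Period"), ("06", "7th Period"), ("07", "8th Period"),
         ("08", "9th Period"), ("09", "10th Period"), ("10", "11th Period"), ("11", "12th Period"),
         ("12", "13th Period"), ("13", "14th Period"), ("14", "15th Period"), ("15", "16th Period"),
         ("16", "17th Period"), ("17", "18th Period"), ("18", "19th Period"), ("19", "20th Period"),
         ("20", "21st Period"), ("21", "22nd Period"), ("22", "23rd Period"), ("23", "24th Period")]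
        : PySem.Dict String String).keys, k.toList.length = 2 := by decide
      have := hall _ hmem
      rwa [String.toList_ofList] at this
    obtain ⟨a, b, hab⟩ : ∃ a b, time.toList.take 2 = [a, b] := by
      match h : time.toList.take 2 with
      | [a, b] => exact ⟨a, b, rfl⟩
      | [] | [_] | _ :: _ :: _ :: _ => rw [h] at hlen2; simp at hlen2
    have hcond : (pyLe [':', '0', '0'] (time.toList.drop 2)
          && pyLe (time.toList.drop 2) [':', '5', '0'])
        = (pyLe (time.toList.take 2 ++ (":00").toList) time.toList
          && pyLe time.toList (time.toList.take 2 ++ (":50").toList)) := by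
      rw [hab, show ((":00") : String).toList = [':', '0', '0'] from rfl,
          show ((":50") : String).toList = [':', '5', '0'] from rfl]
      simp only [List.cons_append, List.nil_append]
      rw [Bool.eq_iff_iff]
      constructor
      · intro hc; exact (pyLe_pair a b _ _ time.toList).mpr ⟨hab, hc⟩
      · intro hc; exact ((pyLe_pair a b _ _ time.toList).mp hc).2
    simp only [hcond]
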